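-- pv_equiv track=rewrite | github.com/Levelent/advent-of-code-2023 | 14/both.py | tilt_across_rows
-- ===== SOURCE A (Python) =====
-- def tilt_across_rows(row: list[str]) -> list[str]:
--     new_row: list[str] = []
--
--     last_hash = -1
--     rock_buffer = 0
--     for i in range(len(row)):
--         match row[i]:
--             case "#":
--                 new_row = (
--                     new_row[: last_hash + 1]
--                     + (["O"] * rock_buffer)
--                     + new_row[last_hash + 1 :]
--                 )
--                 rock_buffer = 0
--                 new_row.append("#")
--                 last_hash = i
--             case ".":
--                 new_row.append(".")
--             case "O":
--                 rock_buffer += 1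
--     return new_row
-- ===== SOURCE B (Python) =====
-- def tilt_across_rows(row: list[str]) -> list[str]:
--     # Single pass, no slicing: keep the output split at the insertion point
--     # (index last_hash+1) as `fixed` (before it) and `pending` (after it),
--     # plus a counter of buffered rocks, avoiding any slicing.
--     fixed: list[str] = []
--     pending: list[str] = []
--     rocks = 0
--     cap = 0  # insertion index = last_hash + 1
--     for i, ch in enumerate(row):
--         if ch == "#":
--             fixed += ["O"] * rocks
--             fixed += pending
--             fixed.append("#")
--             pending = []
--             rocks = 0
--             cap = i + 1
--         elif ch == ".":
--             if len(fixed) < cap: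
--                 fixed.append(".")
--             else:
--                 pending.append(".")
--         elif ch == "O":
--             rocks += 1
--     return fixed + pending
-- ===== Notes on version B (the rewrite author's own statement) =====
-- stated objective: alternative
-- what changed: Replaces A's per-'#' rebuild of the whole output via list slicing with a single pass over two append-only buffers (split at the insertion point) plus a rock counter.
import Mathlib
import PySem

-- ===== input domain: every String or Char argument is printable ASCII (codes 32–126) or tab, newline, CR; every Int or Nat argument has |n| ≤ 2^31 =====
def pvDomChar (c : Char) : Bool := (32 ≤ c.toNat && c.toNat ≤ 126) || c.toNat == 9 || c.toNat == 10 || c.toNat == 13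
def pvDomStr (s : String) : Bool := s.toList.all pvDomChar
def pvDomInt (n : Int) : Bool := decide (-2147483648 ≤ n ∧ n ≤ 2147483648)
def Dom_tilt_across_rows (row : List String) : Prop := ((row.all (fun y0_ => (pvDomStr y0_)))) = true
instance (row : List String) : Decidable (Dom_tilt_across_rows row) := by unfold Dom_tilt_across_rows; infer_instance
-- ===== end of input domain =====

-- B replaces A's per-'#' whole-list slicing rebuild with a single pass over two
-- append-only buffers split at the insertion point; equivalence is total.

-- ===== PORT A =====
def tiltA_step (st : List String × Int × Nat) (p : Int × String) : List String × Int × Nat :=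
  let new_row := st.1
  let last_hash := st.2.1
  let rock := st.2.2
  if p.2 = "#" then
    (PySem.List.slice new_row none (some (last_hash + 1)) ++ List.replicate rock "O"
      ++ PySem.List.slice new_row (some (last_hash + 1)) none ++ ["#"], p.1, 0)
  else if p.2 = "." then (new_row ++ ["."], last_hash, rock)
  else if p.2 = "O" then (new_row, last_hash, rock + 1)
  else st

def tilt_across_rows (row : List String) : List String :=
  ((PySem.List.enumerate row 0).foldl tiltA_step ([], -1, 0)).1

-- ===== PORT B =====
def tiltB_step (st : List String × List String × Nat × Int) (p : Int × String) : List String × List String × Nat × Int :=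
  let fixed := st.1
  let pending := st.2.1
  let rocks := st.2.2.1
  let cap := st.2.2.2
  if p.2 = "#" then
    (fixed ++ List.replicate rocks "O" ++ pending ++ ["#"], [], 0, p.1 + 1)
  else if p.2 = "." then
    if (fixed.length : Int) < cap then (fixed ++ ["."], pending, rocks, cap)
    else (fixed, pending ++ ["."], rocks, cap)
  else if p.2 = "O" then (fixed, pending, rocks + 1, cap)
  else st

def tilt_across_rows_alt (row : List String) : List String :=
  let r := (PySem.List.enumerate row 0).foldl tiltB_step ([], [], 0, 0)
  r.1 ++ r.2.1

-- ===== PRECONDITION & SPEC =====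
def Spec_tilt_across_rows (row : List String) (out : List String) : Prop := out = tilt_across_rows_alt row
instance (row : List String) (out : List String) : Decidable (Spec_tilt_across_rows row out) := by unfold Spec_tilt_across_rows; infer_instance

-- ===== CLAIM (what is proved, stated in full; the proofs are below) =====
def Claim_equal_tilt_across_rows : Prop := ∀ (row : List String), Dom_tilt_across_rows row → Spec_tilt_across_rows row (tilt_across_rows row)

-- ===== LEMMAS AND PROOFS =====

/-- Coupling invariant between A's state and B's state after processing `i` elements. -/
def tiltInv (i : Int) (sa : List String × Int × Nat)
    (sb : List String × List String × Nat × Int) : Prop :=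
  sb.1 ++ sb.2.1 = sa.1 ∧                                -- fixed ++ pending = new_row
  sb.2.2.1 = sa.2.2 ∧                                     -- rocks = rock_buffer
  sb.2.2.2 = sa.2.1 + 1 ∧                                 -- cap = last_hash + 1
  (sb.1.length : Int) ≤ sb.2.2.2 ∧                        -- |fixed| ≤ cap
  (sb.2.1 ≠ [] → (sb.1.length : Int) = sb.2.2.2) ∧        -- pending ≠ [] → |fixed| = cap
  (sa.1.length : Int) + (sa.2.2 : Int) ≤ i                -- |new_row| + rock ≤ processed

theorem tiltInv_step (i : Int) (c : String) (sa : List String × Int × Nat)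
    (sb : List String × List String × Nat × Int) (h : tiltInv i sa sb) :
    tiltInv (i + 1) (tiltA_step sa (i, c)) (tiltB_step sb (i, c)) := by
  obtain ⟨nr, lh, k⟩ := sa
  obtain ⟨f, p, rk, cap⟩ := sb
  obtain ⟨hcat, hrk, hcap, hle, hpe, hlen⟩ := h
  simp only at hcat hrk hcap hle hpe hlen
  by_cases h1 : c = "#"
  · -- slices at index cap = lh + 1, with |fixed| = min cap |new_row|
    obtain ⟨m, hm⟩ : ∃ m : Nat, lh + 1 = (m : Int) := ⟨(lh + 1).toNat, by omega⟩
    have hsliceL : PySem.List.slice nr none (some (lh + 1)) = f := by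
      rcases List.eq_nil_or_concat p with hp | _
      · subst hp
        simp only [List.append_nil] at hcat
        subst hcat
        rw [hm, PySem.List.slice_to_natCast]
        exact List.take_of_length_le (by omega)
      · have hfl : (f.length : Int) = cap := hpe (by rintro rfl; simp_all)
        rw [hm, PySem.List.slice_to_natCast]
        have hmf : m = f.length := by omega
        subst hmf
        rw [← hcat, List.take_left]
    have hsliceR : PySem.List.slice nr (some (lh + 1)) none = p := by
      rcases List.eq_nil_or_concat p with hp | _
      · subst hp
        simp only [List.append_nil] at hcat
        subst hcat
        rw [hm, PySem.List.slice_from_natCast]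
        exact List.drop_of_length_le (by omega)
      · have hfl : (f.length : Int) = cap := hpe (by rintro rfl; simp_all)
        rw [hm, PySem.List.slice_from_natCast]
        have hmf : m = f.length := by omega
        subst hmf
        rw [← hcat, List.drop_left]
    have hA : tiltA_step (nr, lh, k) (i, c)
        = (f ++ List.replicate k "O" ++ p ++ ["#"], i, 0) := by
      simp [tiltA_step, h1, hsliceL, hsliceR]
    have hB : tiltB_step (f, p, rk, cap) (i, c)
        = (f ++ List.replicate rk "O" ++ p ++ ["#"], [], 0, i + 1) := by
      simp [tiltB_step, h1]
    rw [hA, hB]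
    have hnr : nr.length = f.length + p.length := by rw [← hcat]; simp
    refine ⟨by simp [hrk], rfl, rfl, ?_, by simp, ?_⟩ <;>
      · dsimp only
        simp only [List.length_append, List.length_replicate, List.length_cons,
          List.length_nil]
        push_cast
        omega
  · by_cases h2 : c = "."
    · have hA : tiltA_step (nr, lh, k) (i, c) = (nr ++ ["."], lh, k) := by
        simp [tiltA_step, h2]
      by_cases h3 : (f.length : Int) < cap
      · have hp : p = [] := by
          by_contra hne
          have := hpe hne
          omega
        subst hp
        simp only [List.append_nil] at hcat
        subst hcat
        have hB : tiltB_step (f, [], rk, cap) (i, c) = (f ++ ["."], [], rk, cap) := by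
          simp [tiltB_step, h2, h3]
        rw [hA, hB]
        refine ⟨by simp, hrk, hcap, ?_, by simp, ?_⟩ <;>
          · dsimp only
            try simp only [List.length_append, List.length_cons, List.length_nil]
            push_cast
            omega
      · have hB : tiltB_step (f, p, rk, cap) (i, c) = (f, p ++ ["."], rk, cap) := by
          simp [tiltB_step, h2, h3]
        rw [hA, hB]
        refine ⟨by simp [← hcat], hrk, hcap, ?_, fun _ => by dsimp only; omega, ?_⟩ <;>
          · dsimp only
            try simp only [List.length_append, List.length_cons, List.length_nil]
            push_cast
            omega
    · by_cases h4 : c = "O"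
      · have hA : tiltA_step (nr, lh, k) (i, c) = (nr, lh, k + 1) := by
          simp [tiltA_step, h4]
        have hB : tiltB_step (f, p, rk, cap) (i, c) = (f, p, rk + 1, cap) := by
          simp [tiltB_step, h4]
        rw [hA, hB]
        exact ⟨hcat, by dsimp only; omega, hcap, hle, hpe, by dsimp only; push_cast; omega⟩
      · have hA : tiltA_step (nr, lh, k) (i, c) = (nr, lh, k) := by
          simp [tiltA_step, h1, h2, h4]
        have hB : tiltB_step (f, p, rk, cap) (i, c) = (f, p, rk, cap) := by
          simp [tiltB_step, h1, h2, h4]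
        rw [hA, hB]
        exact ⟨hcat, hrk, hcap, hle, hpe, by dsimp only; omega⟩

theorem tiltInv_foldl (l : List String) : ∀ (i : Int) (sa : List String × Int × Nat)
    (sb : List String × List String × Nat × Int), tiltInv i sa sb →
    tiltInv (i + l.length)
      ((PySem.List.enumerate l i).foldl tiltA_step sa)
      ((PySem.List.enumerate l i).foldl tiltB_step sb) := by
  induction l with
  | nil => intro i sa sb h; simpa [PySem.List.enumerate_nil] using h
  | cons c t ih =>
    intro i sa sb h
    rw [PySem.List.enumerate_cons, List.foldl_cons, List.foldl_cons]
    have := ih (i + 1) _ _ (tiltInv_step i c sa sb h)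
    simpa [add_assoc, add_comm, add_left_comm] using this

-- ===== VERDICT (by name: the statement is the Claim_ definition above) =====
theorem tilt_across_rows_spec : Claim_equal_tilt_across_rows := by
  intro row _
  have h0 : tiltInv 0 ([], -1, 0) ([], [], 0, 0) := by
    simp [tiltInv]
  have h := tiltInv_foldl row 0 _ _ h0
  unfold Spec_tilt_across_rows tilt_across_rows tilt_across_rows_alt
  exact (h.1).symm
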